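-- pv_equiv track=rewrite | github.com/SpanishST/xtreamfilter | app/services/cache_service.py | _derive_source_status
-- ===== SOURCE A (Python) =====
-- from typing import TYPE_CHECKING, Any, Optional
--
-- def _derive_source_status(source_result: dict[str, Any]) -> str:
--     statuses = {step.get("status", "pending") for step in source_result.get("steps", [])}
--     if "running" in statuses:
--         return "running"
--     has_success = "success" in statuses
--     has_failure = "failed" in statuses
--     if has_success and has_failure:
--         return "partial"
--     if has_success:
--         return "success"
--     if has_failure:
--         return "failed"
--     return "pending"
-- ===== SOURCE B (Python) =====
-- _CODE = {"running": 4, "success": 1, "failed": 2}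
-- _DECODE = ["pending", "success", "failed", "partial"]
--
-- def _derive_source_status(source_result: dict) -> str:
--     mask = 0
--     for step in source_result.get("steps", []):
--         mask |= _CODE.get(step.get("status", "pending"), 0)
--     if mask >= 4:
--         return "running"
--     return _DECODE[mask]
-- ===== Notes on version B (the rewrite author's own statement) =====
-- stated objective: alternative
-- what changed: Replaces the status set and the membership-test branch cascade with an algebraic reduction: each step status is encoded as a bit (running=4, failed=2, success=1), the bits are OR-folded into one integer mask, and the answer is read off a 4-entry decode table.
import Mathlib
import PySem

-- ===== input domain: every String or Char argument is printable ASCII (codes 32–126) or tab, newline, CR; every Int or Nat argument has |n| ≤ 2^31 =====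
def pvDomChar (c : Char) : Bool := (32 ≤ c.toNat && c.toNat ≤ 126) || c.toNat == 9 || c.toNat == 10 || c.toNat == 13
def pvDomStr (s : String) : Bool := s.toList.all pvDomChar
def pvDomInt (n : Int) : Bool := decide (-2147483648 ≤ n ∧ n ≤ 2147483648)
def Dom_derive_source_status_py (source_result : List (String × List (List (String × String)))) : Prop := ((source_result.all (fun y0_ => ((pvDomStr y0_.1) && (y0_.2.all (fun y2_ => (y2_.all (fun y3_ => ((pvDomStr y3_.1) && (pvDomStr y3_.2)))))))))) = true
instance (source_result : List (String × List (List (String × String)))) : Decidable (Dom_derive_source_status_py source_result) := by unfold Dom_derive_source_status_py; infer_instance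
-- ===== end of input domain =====

-- B: encodes each status as a bit (running=4, failed=2, success=1), OR-folds the bits into one mask, decodes via a 4-entry table (alternative decomposition).

-- ===== PORT A =====
def derive_source_status_py (source_result : List (String × List (List (String × String)))) : String :=
  let statuses : PySem.Set String :=
    PySem.Set.ofList ((PySem.Dict.getD ⟨source_result⟩ "steps" []).map
      (fun step => PySem.Dict.getD ⟨step⟩ "status" "pending"))
  if statuses.contains "running" then "running"
  else
    let has_success := statuses.contains "success"
    let has_failure := statuses.contains "failed"
    if has_success && has_failure then "partial"
    else if has_success then "success"
    else if has_failure then "failed"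
    else "pending"

-- ===== PORT B =====
-- the module-level tables of Source B
def dssCodeTable : PySem.Dict String Nat := ⟨[("running", 4), ("success", 1), ("failed", 2)]⟩
def dssDecodeTable : List String := ["pending", "success", "failed", "partial"]

-- the for-loop of Source B: mask |= _CODE.get(step.get("status","pending"), 0)
def dssMaskFold (steps : List (List (String × String))) (mask : Nat) : Nat :=
  match steps with
  | [] => mask
  | step :: rest =>
    dssMaskFold rest (mask ||| dssCodeTable.getD (PySem.Dict.getD ⟨step⟩ "status" "pending") 0)

def derive_source_status_py_alt (source_result : List (String × List (List (String × String)))) : String :=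
  let mask := dssMaskFold (PySem.Dict.getD ⟨source_result⟩ "steps" []) 0
  if mask ≥ 4 then "running"
  else (PySem.List.pyGet? dssDecodeTable (mask : Int)).getD ""

-- ===== PRECONDITION & SPEC =====
def Spec_derive_source_status_py (source_result : List (String × List (List (String × String)))) (out : String) : Prop := out = derive_source_status_py_alt source_result
instance (source_result : List (String × List (List (String × String)))) (out : String) : Decidable (Spec_derive_source_status_py source_result out) := by unfold Spec_derive_source_status_py; infer_instance

-- ===== CLAIM (what is proved, stated in full; the proofs are below) =====
def Claim_equal_derive_source_status_py : Prop := ∀ (source_result : List (String × List (List (String × String)))), Dom_derive_source_status_py source_result → Spec_derive_source_status_py source_result (derive_source_status_py source_result)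

-- ===== LEMMAS AND PROOFS =====
def dssStatus (step : List (String × String)) : String :=
  PySem.Dict.getD ⟨step⟩ "status" "pending"

-- the value the OR-fold accumulates, expressed from the three occurrence facts
def dssM (steps : List (List (String × String))) : Nat :=
  (if steps.any (fun s => dssStatus s == "running") then 4 else 0) |||
  ((if steps.any (fun s => dssStatus s == "failed") then 2 else 0) |||
   (if steps.any (fun s => dssStatus s == "success") then 1 else 0))

lemma dssStep_lor (x : String) (bR bF bS : Bool) :
    dssCodeTable.getD x 0 |||
      ((if bR then 4 else 0) ||| ((if bF then 2 else 0) ||| (if bS then 1 else 0)))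
  = (if (x == "running" || bR) then 4 else 0) |||
      ((if (x == "failed" || bF) then 2 else 0) ||| (if (x == "success" || bS) then 1 else 0)) := by
  by_cases hr : x = "running"
  · subst hr; cases bR <;> cases bF <;> cases bS <;> decide
  by_cases hsx : x = "success"
  · subst hsx; cases bR <;> cases bF <;> cases bS <;> decide
  by_cases hfx : x = "failed"
  · subst hfx; cases bR <;> cases bF <;> cases bS <;> decide
  have h0 : dssCodeTable.getD x 0 = 0 := by
    have e1 : ("running" == x) = false := beq_eq_false_iff_ne.mpr (Ne.symm hr)
    have e2 : ("success" == x) = false := beq_eq_false_iff_ne.mpr (Ne.symm hsx)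
    have e3 : ("failed" == x) = false := beq_eq_false_iff_ne.mpr (Ne.symm hfx)
    simp [dssCodeTable, PySem.Dict.getD, PySem.Dict.get?, List.find?, e1, e2, e3]
  have h1 : (x == "running") = false := beq_eq_false_iff_ne.mpr hr
  have h2 : (x == "failed") = false := beq_eq_false_iff_ne.mpr hfx
  have h3 : (x == "success") = false := beq_eq_false_iff_ne.mpr hsx
  rw [h0]
  simp only [h1, h2, h3, Bool.false_or]
  cases bR <;> cases bF <;> cases bS <;> decide

lemma dssMaskFold_eq (steps : List (List (String × String))) (m : Nat) :
    dssMaskFold steps m = m ||| dssM steps := by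
  induction steps generalizing m with
  | nil => simp [dssMaskFold, dssM]
  | cons step rest ih =>
    simp only [dssMaskFold]
    rw [ih, Nat.lor_assoc]
    congr 1
    rw [show (PySem.Dict.getD ⟨step⟩ "status" "pending") = dssStatus step from rfl]
    simp only [dssM, List.any_cons]
    exact dssStep_lor (dssStatus step) _ _ _

lemma dssSet_contains (l : List (List (String × String))) (x : String) :
    (PySem.Set.ofList (l.map (fun step => PySem.Dict.getD ⟨step⟩ "status" "pending"))).contains x
      = l.any (fun step => dssStatus step == x) := by
  rw [Bool.eq_iff_iff]
  simp only [PySem.Set.contains_iff, PySem.Set.mem_ofList, List.mem_map, List.any_eq_true,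
    beq_iff_eq, dssStatus]

lemma dssDecode (bR bF bS : Bool) :
    (if bR then "running"
     else if (bS && bF) then "partial"
     else if bS then "success"
     else if bF then "failed"
     else "pending")
  = (let mask : Nat := 0 ||| ((if bR then 4 else 0) ||| ((if bF then 2 else 0) ||| (if bS then 1 else 0)));
     if mask ≥ 4 then "running" else (PySem.List.pyGet? dssDecodeTable (mask : Int)).getD "") := by
  cases bR <;> cases bF <;> cases bS <;> decide

-- ===== VERDICT (by name: the statement is the Claim_ definition above) =====
theorem derive_source_status_py_spec : Claim_equal_derive_source_status_py := by
  intro source_result _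
  show derive_source_status_py source_result = derive_source_status_py_alt source_result
  simp only [derive_source_status_py, derive_source_status_py_alt, dssMaskFold_eq,
    dssSet_contains, dssM]
  exact dssDecode _ _ _
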